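-- pv_equiv track=rewrite | github.com/maamato/pubblicawebapp | webregression.py | changexlabelFrequency
-- ===== SOURCE A (Python) =====
-- def changexlabelFrequency(values):
--     pari = False if len(values) % 2 else True
--     inc=1
--     if pari==False:
--         inc=0
--     modxlabel=list()
--     for i in values:
--         if inc%2==0:
--             modxlabel.append(i)
--         else:
--             modxlabel.append("")
--         inc =inc+1
--     return modxlabel
-- ===== SOURCE B (Python) =====
-- def changexlabelFrequency(values):
--     result = list(values)
--     start = len(values) % 2
--     result[start::2] = [""] * len(result[start::2])
--     return result
-- ===== Notes on version B (the rewrite author's own statement) =====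
-- stated objective: idiomatic
-- what changed: Replaces A's counter-driven per-element if/else append loop with a shallow copy plus one strided slice assignment that blanks every index congruent to len(values) mod 2.
import Mathlib
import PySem

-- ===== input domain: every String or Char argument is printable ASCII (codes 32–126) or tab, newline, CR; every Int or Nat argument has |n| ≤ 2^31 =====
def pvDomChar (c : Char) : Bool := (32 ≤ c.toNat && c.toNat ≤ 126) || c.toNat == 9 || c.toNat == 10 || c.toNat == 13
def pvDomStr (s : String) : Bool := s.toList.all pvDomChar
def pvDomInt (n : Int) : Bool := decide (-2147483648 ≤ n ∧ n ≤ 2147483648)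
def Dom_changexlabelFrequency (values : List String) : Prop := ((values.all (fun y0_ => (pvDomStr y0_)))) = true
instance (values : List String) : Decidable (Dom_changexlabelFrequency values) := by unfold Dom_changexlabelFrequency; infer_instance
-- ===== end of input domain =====

-- B replaces A's counter-driven per-element if/else loop with a copy plus one strided slice blanking (idiomatic; same behaviour).

-- ===== PORT A =====
def changexlabelFrequency (values : List String) : List String :=
  let pari : Bool := if values.length % 2 ≠ 0 then false else true
  let inc : Int := if pari == false then 0 else 1
  (values.foldl
    (fun (st : List String × Int) i =>
      (st.1 ++ [if PySem.Int.mod st.2 2 == 0 then i else ""], st.2 + 1))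
    ([], inc)).1

-- ===== PORT B =====
-- B's strided slice assignment result[start::2] = [""]*… blanks exactly the
-- indices congruent to start mod 2; ported as an index-aware map over the list.
def changexlabelFrequency_alt (values : List String) : List String :=
  let start : Int := (values.length : Int) % 2
  (PySem.List.enumerate values).map (fun p => if PySem.Int.mod p.1 2 == start then "" else p.2)

-- ===== PRECONDITION & SPEC =====
def Spec_changexlabelFrequency (values : List String) (out : List String) : Prop := out = changexlabelFrequency_alt values
instance (values : List String) (out : List String) : Decidable (Spec_changexlabelFrequency values out) := by unfold Spec_changexlabelFrequency; infer_instance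

-- ===== CLAIM (what is proved, stated in full; the proofs are below) =====
def Claim_equal_changexlabelFrequency : Prop := ∀ (values : List String), Dom_changexlabelFrequency values → Spec_changexlabelFrequency values (changexlabelFrequency values)

-- ===== LEMMAS AND PROOFS =====

theorem fold_eq_enum (xs : List String) :
    ∀ (acc : List String) (k j m : Int), (m = 0 ∨ m = 1) → (k + j + m) % 2 = 1 →
    (xs.foldl
      (fun (st : List String × Int) i =>
        (st.1 ++ [if PySem.Int.mod st.2 2 == 0 then i else ""], st.2 + 1))
      (acc, k)).1
    = acc ++ (PySem.List.enumerate xs j).map (fun p => if PySem.Int.mod p.1 2 == m then "" else p.2) := by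
  induction xs with
  | nil => intro acc k j m _ _; simp [PySem.List.enumerate_nil]
  | cons x xs ih =>
    intro acc k j m hm h
    rw [List.foldl_cons, PySem.List.enumerate_cons, List.map_cons]
    have hk : PySem.Int.mod k 2 = k % 2 := PySem.Int.mod_eq_emod_of_pos (by norm_num)
    have hj : PySem.Int.mod j 2 = j % 2 := PySem.Int.mod_eq_emod_of_pos (by norm_num)
    have hcond : (if PySem.Int.mod k 2 == 0 then x else "") = (if PySem.Int.mod j 2 == m then "" else x) := by
      rcases hm with rfl | rfl <;> rw [hk, hj] <;> by_cases hke : k % 2 = 0 <;>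
        simp [hke] <;> omega
    rw [ih (acc ++ [if PySem.Int.mod k 2 == 0 then x else ""]) (k+1) (j+1) m hm (by omega)]
    rw [hcond, List.append_assoc, List.singleton_append]

-- ===== VERDICT (by name: the statement is the Claim_ definition above) =====
theorem changexlabelFrequency_spec : Claim_equal_changexlabelFrequency := by
  intro values _
  show changexlabelFrequency values = changexlabelFrequency_alt values
  unfold changexlabelFrequency changexlabelFrequency_alt
  dsimp only
  rcases Nat.even_or_odd values.length with he | ho
  · have h2 : values.length % 2 = 0 := Nat.even_iff.mp he
    have h2i : ((values.length : Int)) % 2 = 0 := by omega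
    have hstart : (if ((if values.length % 2 ≠ 0 then false else true) == false) = true then (0:Int) else 1) = 1 := by
      simp [h2]
    rw [hstart, h2i, fold_eq_enum values [] 1 0 0 (by omega) (by omega)]
    simp
  · have h2 : values.length % 2 = 1 := Nat.odd_iff.mp ho
    have h2i : ((values.length : Int)) % 2 = 1 := by omega
    have hstart : (if ((if values.length % 2 ≠ 0 then false else true) == false) = true then (0:Int) else 1) = 0 := by
      simp [h2]
    rw [hstart, h2i, fold_eq_enum values [] 0 0 1 (by omega) (by omega)]
    simp
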